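-- pv_equiv track=rewrite | github.com/Zero6992/Spring-2023 | Artificial Intelligence/hw02/IDS.py | ids
-- ===== SOURCE A (Python) =====
-- def spread_cancer(board):
--     new_board = [0] * len(board)
--     for i in range(len(board)):
--         if board[i] == 1:
--             if i - 1 >= 0:
--                 new_board[i - 1] = 1
--             if i + 1 < len(board):
--                 new_board[i + 1] = 1
--     return new_board
--
-- def dfs(board, depth, max_depth, moves):
--     if depth == max_depth:
--         return moves if all(x == 0 for x in board) else None
--
--     for i in range(len(board)):
--         if board[i] == 1:
--             new_board = board.copy()
--             new_board[i] = 0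
--             new_board = spread_cancer(new_board)
--             result = dfs(new_board, depth + 1, max_depth, moves + [i + 1])
--             if result is not None:
--                 return result
--     return None
--
-- def ids(board):
--     depth = 0
--     max_depth = len(board)
--     while depth <= max_depth:
--         result = dfs(board, 0, depth, [])
--         if result is not None:
--             return result
--         depth += 1
--     return None
-- ===== SOURCE B (Python) =====
-- def _next_board(b, i, n):
--     # zero cell i, then every cell adjacent to a remaining 1 becomes 1
--     zeroed = b[:i] + (0,) + b[i + 1:]
--     return tuple(
--         1 if ((j > 0 and zeroed[j - 1] == 1)
--               or (j + 1 < n and zeroed[j + 1] == 1)) else 0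
--         for j in range(n))
--
--
-- def ids(board):
--     # Memoized iterative deepening: DFS suffixes keyed by (board state, remaining
--     # depth), reused across branches and across deepening iterations.
--     n = len(board)
--     memo = {}
--
--     def solve(b, rem):
--         key = (b, rem)
--         if key in memo:
--             return memo[key]
--         if rem == 0:
--             res = [] if all(x == 0 for x in b) else None
--         else:
--             res = None
--             for i in range(n):
--                 if b[i] == 1:
--                     sub = solve(_next_board(b, i, n), rem - 1)
--                     if sub is not None:
--                         res = [i + 1] + sub
--                         break
--         memo[key] = res
--         return res
--
--     b0 = tuple(board)
--     for depth in range(n + 1):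
--         r = solve(b0, depth)
--         if r is not None:
--             return r
--     return None
-- ===== Notes on version B (the rewrite author's own statement) =====
-- stated objective: alternative
-- what changed: B memoizes the DFS suffix result by (board state, remaining depth) in a dict shared across branches and across all iterative-deepening iterations, so each reachable (state, depth) pair is searched at most once, and it builds the successor board directly with a comprehension instead of copy-then-spread; this avoids A's recomputation on branchy solvable boards but was not measurably faster on the generated timing inputs.
import Mathlib
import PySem

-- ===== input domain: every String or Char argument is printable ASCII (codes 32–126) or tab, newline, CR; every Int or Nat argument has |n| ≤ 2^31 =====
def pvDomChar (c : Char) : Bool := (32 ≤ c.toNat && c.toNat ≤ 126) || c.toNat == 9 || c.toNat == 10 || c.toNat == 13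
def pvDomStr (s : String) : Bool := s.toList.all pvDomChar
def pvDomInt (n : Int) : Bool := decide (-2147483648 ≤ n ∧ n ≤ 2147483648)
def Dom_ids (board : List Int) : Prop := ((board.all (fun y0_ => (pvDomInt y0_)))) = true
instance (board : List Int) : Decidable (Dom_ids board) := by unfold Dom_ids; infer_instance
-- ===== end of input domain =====

-- B replaces A's plain iterative-deepening DFS by one that memoizes DFS suffixes by
-- (board state, remaining depth), reused across branches and deepening iterations (alternative).

-- ===== PORT A =====

def spreadCancer (board : List Int) : List Int :=
  (PySem.List.pyRange 0 (board.length : Int) 1).foldl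
    (fun nb i =>
      if PySem.List.pyGetD board i 0 == 1 then
        let nb1 := if 0 ≤ i - 1 then PySem.List.pySetD nb (i - 1) 1 else nb
        if i + 1 < (board.length : Int) then PySem.List.pySetD nb1 (i + 1) 1 else nb1
      else nb)
    (List.replicate board.length 0)

mutual
def dfs (board : List Int) (depth maxDepth : Int) (moves : List Int) :
    Option (List Int) :=
  if depth == maxDepth then
    (if board.all (fun x => x == 0) then some moves else none)
  else
    dfsLoop board depth maxDepth moves (PySem.List.pyRange 0 (board.length : Int) 1)
  termination_by ((maxDepth - depth).toNat, board.length + 1)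
  decreasing_by simp [PySem.List.length_pyRange_one]; omega

def dfsLoop (board : List Int) (depth maxDepth : Int) (moves : List Int) :
    List Int → Option (List Int)
  | [] => none
  | i :: rest =>
    if PySem.List.pyGetD board i 0 == 1 then
      -- totality guard: false only when depth > maxDepth, which ids never reaches
      if _h : depth < maxDepth then
        match dfs (spreadCancer (PySem.List.pySetD board i 0)) (depth + 1) maxDepth
            (moves ++ [i + 1]) with
        | some r => some r
        | none => dfsLoop board depth maxDepth moves rest
      else none
    else dfsLoop board depth maxDepth moves rest
  termination_by is => ((maxDepth - depth).toNat, is.length)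
  decreasing_by all_goals first
    | (left; omega)
    | (right; omega)
    | (right; simp)
end

def idsLoop (board : List Int) (depth maxDepth : Int) : Option (List Int) :=
  if depth ≤ maxDepth then
    match dfs board 0 depth [] with
    | some r => some r
    | none => idsLoop board (depth + 1) maxDepth
  else none
  termination_by (maxDepth + 1 - depth).toNat
  decreasing_by omega

def ids (board : List Int) : Option (List Int) :=
  idsLoop board 0 (PySem.List.len board)

-- ===== PORT B =====

def nextBoard (b : List Int) (i n : Int) : List Int :=
  let zeroed := PySem.List.slice b none (some i) ++ [(0 : Int)] ++
    PySem.List.slice b (some (i + 1)) none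
  (PySem.List.pyRange 0 n 1).map (fun j =>
    if (0 < j ∧ PySem.List.pyGetD zeroed (j - 1) 0 == 1) ∨
       (j + 1 < n ∧ PySem.List.pyGetD zeroed (j + 1) 0 == 1) then (1 : Int) else 0)

abbrev Memo := PySem.Dict (List Int × Int) (Option (List Int))

def solveLoop (f : List Int → Memo → Option (List Int) × Memo)
    (b : List Int) (n : Int) : List Int → Memo → Option (List Int) × Memo
  | [], memo => (none, memo)
  | i :: rest, memo =>
    if PySem.List.pyGetD b i 0 == 1 then
      match f (nextBoard b i n) memo with
      | (some s, memo') => (some ((i + 1) :: s), memo')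
      | (none, memo') => solveLoop f b n rest memo'
    else solveLoop f b n rest memo

def solveN (n : Int) (b : List Int) (rem : Nat) (memo : Memo) :
    Option (List Int) × Memo :=
  match memo.get? (b, (rem : Int)) with
  | some res => (res, memo)
  | none =>
    let p : Option (List Int) × Memo :=
      match rem with
      | 0 => ((if b.all (fun x => x == 0) then some [] else none), memo)
      | r + 1 => solveLoop (fun nb m => solveN n nb r m) b n
          (PySem.List.pyRange 0 n 1) memo
    (p.1, p.2.insert (b, (rem : Int)) p.1)

def idsAltLoop (n : Int) (b0 : List Int) (memo : Memo) :
    List Int → Option (List Int)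
  | [] => none
  | d :: ds =>
    -- d comes from range(n+1), so d ≥ 0 and d.toNat = d
    match solveN n b0 d.toNat memo with
    | (some r, _) => some r
    | (none, memo') => idsAltLoop n b0 memo' ds

def ids_alt (board : List Int) : Option (List Int) :=
  idsAltLoop (PySem.List.len board) board PySem.Dict.empty
    (PySem.List.pyRange 0 (PySem.List.len board + 1) 1)

-- ===== PRECONDITION & SPEC =====
def Spec_ids (board : List Int) (out : Option (List Int)) : Prop := out = ids_alt board
instance (board : List Int) (out : Option (List Int)) : Decidable (Spec_ids board out) := by unfold Spec_ids; infer_instance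

-- ===== CLAIM (what is proved, stated in full; the proofs are below) =====
def Claim_equal_ids : Prop := ∀ (board : List Int), Dom_ids board → Spec_ids board (ids board)

-- ===== LEMMAS AND PROOFS =====

-- Memo-free reference function: the value solve(b, rem) computes in B.
def gLoop (f : List Int → Option (List Int)) (b : List Int) (n : Int) :
    List Int → Option (List Int)
  | [] => none
  | i :: rest =>
    if PySem.List.pyGetD b i 0 == 1 then
      match f (nextBoard b i n) with
      | some s => some ((i + 1) :: s)
      | none => gLoop f b n rest
    else gLoop f b n rest

def g (n : Int) (b : List Int) : Nat → Option (List Int)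
  | 0 => if b.all (fun x => x == 0) then some [] else none
  | r + 1 => gLoop (fun nb => g n nb r) b n (PySem.List.pyRange 0 n 1)

-- Every memo entry is correct.
def GoodM (n : Int) (memo : Memo) : Prop :=
  ∀ b (r : Int) res, memo.get? (b, r) = some res → 0 ≤ r ∧ res = g n b r.toNat

theorem goodM_empty (n : Int) : GoodM n PySem.Dict.empty := by
  intro b r res h
  simp [PySem.Dict.get?_empty] at h

theorem solveLoop_ok (n : Int) (r : Nat)
    (f : List Int → Memo → Option (List Int) × Memo)
    (hf : ∀ nb m, GoodM n m → (f nb m).1 = g n nb r ∧ GoodM n (f nb m).2) :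
    ∀ (l : List Int) (b : List Int) (memo : Memo), GoodM n memo →
      (solveLoop f b n l memo).1 = gLoop (fun nb => g n nb r) b n l ∧
      GoodM n (solveLoop f b n l memo).2 := by
  intro l
  induction l with
  | nil => intro b memo hm; exact ⟨rfl, hm⟩
  | cons i rest ih =>
    intro b memo hm
    by_cases hc : (PySem.List.pyGetD b i 0 == 1) = true
    · obtain ⟨h1, h2⟩ := hf (nextBoard b i n) memo hm
      cases hfb : f (nextBoard b i n) memo with
      | mk fst memo' =>
        rw [hfb] at h1 h2
        cases fst with
        | some s =>
          simp only [solveLoop, gLoop, hc, if_pos, hfb, ← h1]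
          exact ⟨trivial, h2⟩
        | none =>
          simp only [solveLoop, gLoop, hc, if_pos, hfb, ← h1]
          exact ih b memo' h2
    · simp only [solveLoop, gLoop, hc, Bool.false_eq_true, ite_false]
      exact ih b memo hm

theorem solveN_ok (n : Int) :
    ∀ (r : Nat) (b : List Int) (memo : Memo), GoodM n memo →
      (solveN n b r memo).1 = g n b r ∧ GoodM n (solveN n b r memo).2 := by
  intro r
  induction r with
  | zero =>
    intro b memo hm
    cases hg : memo.get? (b, ((0 : Nat) : Int)) with
    | some res =>
      obtain ⟨_, hres⟩ := hm b _ _ hg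
      simp only [solveN, hg]
      exact ⟨by simpa using hres, hm⟩
    | none =>
      simp only [solveN, hg, g]
      refine ⟨by trivial, ?_⟩
      intro b' r' res' h'
      rw [PySem.Dict.get?_insert] at h'
      split at h'
      · rename_i heq
        obtain ⟨hb', hr'⟩ := Prod.mk.injEq .. ▸ heq
        cases h'
        subst hb' hr'
        simp [g]
      · exact hm b' r' res' h'
  | succ r ih =>
    intro b memo hm
    cases hg : memo.get? (b, ((r + 1 : Nat) : Int)) with
    | some res =>
      obtain ⟨_, hres⟩ := hm b _ _ hg
      simp only [solveN, hg]
      exact ⟨by simpa using hres, hm⟩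
    | none =>
      have hloop := solveLoop_ok n r (fun nb m => solveN n nb r m)
        (fun nb m hmg => ih nb m hmg) (PySem.List.pyRange 0 n 1) b memo hm
      simp only [solveN, hg]
      refine ⟨by simpa [g] using hloop.1, ?_⟩
      intro b' r' res' h'
      rw [PySem.Dict.get?_insert] at h'
      split at h'
      · rename_i heq
        obtain ⟨hb', hr'⟩ := Prod.mk.injEq .. ▸ heq
        cases h'
        subst hb' hr'
        refine ⟨by omega, ?_⟩
        simpa [g] using hloop.1
      · exact hloop.2 b' r' res' h'

-- ===== A-side bridge =====

-- the body of spreadCancer's loop, named for the proofs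
def spreadStep (z nb : List Int) (i : Int) : List Int :=
  if PySem.List.pyGetD z i 0 == 1 then
    let nb1 := if 0 ≤ i - 1 then PySem.List.pySetD nb (i - 1) 1 else nb
    if i + 1 < (z.length : Int) then PySem.List.pySetD nb1 (i + 1) 1 else nb1
  else nb

theorem spreadCancer_eq_foldl (z : List Int) :
    spreadCancer z =
      (PySem.List.pyRange 0 (z.length : Int) 1).foldl (spreadStep z)
        (List.replicate z.length 0) := rfl

theorem length_spreadStep (z nb : List Int) (i : Int) :
    (spreadStep z nb i).length = nb.length := by
  unfold spreadStep
  split_ifs <;> simp [PySem.List.length_pySetD]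

theorem mset_get (cond : Prop) [Decidable cond] (acc : List Int) (k : Int) (j : Nat)
    (hk : cond → 0 ≤ k ∧ k < (acc.length : Int)) :
    (if cond then PySem.List.pySetD acc k 1 else acc)[j]? =
      if cond ∧ (j : Int) = k then some 1 else acc[j]? := by
  by_cases hc : cond
  · obtain ⟨h0k, hlt⟩ := hk hc
    rw [if_pos hc, PySem.List.pySetD_of_nonneg acc 1 h0k, List.getElem?_set]
    by_cases hj : (j : Int) = k
    · have hkj : k.toNat = j := by omega
      rw [if_pos hkj, if_pos (by omega), if_pos ⟨hc, hj⟩]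
    · have hkj : ¬ (k.toNat = j) := by omega
      rw [if_neg hkj, if_neg (by tauto)]
  · simp [hc]

theorem spreadStep_get (z acc : List Int) (hlen : acc.length = z.length) (i : Int)
    (h0 : 0 ≤ i) (hi : i < (z.length : Int)) (j : Nat) :
    (spreadStep z acc i)[j]? =
      if PySem.List.pyGetD z i 0 = 1 ∧
          ((1 ≤ i ∧ (j : Int) = i - 1) ∨
           (i + 1 < (z.length : Int) ∧ (j : Int) = i + 1))
        then some 1 else acc[j]? := by
  unfold spreadStep
  by_cases hz : PySem.List.pyGetD z i 0 = 1
  · rw [if_pos (by simp [hz])]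
    have hlen1 : (if 0 ≤ i - 1 then PySem.List.pySetD acc (i - 1) 1 else acc).length
        = acc.length := by split_ifs <;> simp [PySem.List.length_pySetD]
    rw [mset_get (i + 1 < (z.length : Int)) _ (i + 1) j
      (fun h => ⟨by omega, by rw [hlen1, hlen]; exact h⟩)]
    rw [mset_get (0 ≤ i - 1) acc (i - 1) j
      (fun h => ⟨h, by rw [hlen]; omega⟩)]
    simp only [hz, true_and]
    split_ifs <;> first | rfl | omega
  · rw [if_neg (by simp [hz]), if_neg (by tauto)]

theorem spread_get (z : List Int) :
    ∀ (l : List Int) (acc : List Int), acc.length = z.length →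
      (∀ i ∈ l, 0 ≤ i ∧ i < (z.length : Int)) → ∀ (j : Nat),
      (l.foldl (spreadStep z) acc)[j]? =
        if ∃ i ∈ l, PySem.List.pyGetD z i 0 = 1 ∧
            ((1 ≤ i ∧ (j : Int) = i - 1) ∨
             (i + 1 < (z.length : Int) ∧ (j : Int) = i + 1))
          then some 1 else acc[j]? := by
  intro l
  induction l with
  | nil => intro acc _ _ j; simp
  | cons i rest ih =>
    intro acc hlen hpos j
    rw [List.foldl_cons,
      ih (spreadStep z acc i) (by rw [length_spreadStep]; exact hlen)
        (fun x hx => hpos x (List.mem_cons_of_mem _ hx)) j,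
      spreadStep_get z acc hlen i (hpos i (List.mem_cons_self ..)).1
        (hpos i (List.mem_cons_self ..)).2 j]
    by_cases hrest : ∃ x ∈ rest, PySem.List.pyGetD z x 0 = 1 ∧
        ((1 ≤ x ∧ (j : Int) = x - 1) ∨ (x + 1 < (z.length : Int) ∧ (j : Int) = x + 1))
    · have hcons : ∃ x ∈ i :: rest, PySem.List.pyGetD z x 0 = 1 ∧
          ((1 ≤ x ∧ (j : Int) = x - 1) ∨ (x + 1 < (z.length : Int) ∧ (j : Int) = x + 1)) := by
        obtain ⟨x, hx, hw⟩ := hrest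
        exact ⟨x, List.mem_cons_of_mem _ hx, hw⟩
      rw [if_pos hrest, if_pos hcons]
    · rw [if_neg hrest]
      by_cases hone : PySem.List.pyGetD z i 0 = 1 ∧
          ((1 ≤ i ∧ (j : Int) = i - 1) ∨ (i + 1 < (z.length : Int) ∧ (j : Int) = i + 1))
      · rw [if_pos hone, if_pos ⟨i, List.mem_cons_self .., hone⟩]
      · have hnot : ¬ ∃ x ∈ i :: rest, PySem.List.pyGetD z x 0 = 1 ∧
            ((1 ≤ x ∧ (j : Int) = x - 1) ∨ (x + 1 < (z.length : Int) ∧ (j : Int) = x + 1)) := by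
          rintro ⟨x, hx, hw⟩
          rcases List.mem_cons.mp hx with h | h
          · exact hone (h ▸ hw)
          · exact hrest ⟨x, h, hw⟩
        rw [if_neg hone, if_neg hnot]

theorem zeroed_eq (b : List Int) (i : Int) (h0 : 0 ≤ i) (hi : i < (b.length : Int)) :
    PySem.List.slice b none (some i) ++ [(0 : Int)] ++
      PySem.List.slice b (some (i + 1)) none = PySem.List.pySetD b i 0 := by
  rw [PySem.List.slice_to b h0, PySem.List.slice_from b (by omega),
    PySem.List.pySetD_of_nonneg b 0 h0, List.set_eq_take_cons_drop 0 (by omega)]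
  have h : (i + 1).toNat = i.toNat + 1 := by omega
  simp [h]

theorem exists_writer_iff (z : List Int) (j : Nat) (hj : j < z.length) :
    (∃ x ∈ PySem.List.pyRange 0 (z.length : Int) 1,
        PySem.List.pyGetD z x 0 = 1 ∧
          ((1 ≤ x ∧ (j : Int) = x - 1) ∨
           (x + 1 < (z.length : Int) ∧ (j : Int) = x + 1))) ↔
      ((0 < (j : Int) ∧ PySem.List.pyGetD z ((j : Int) - 1) 0 = 1) ∨
       ((j : Int) + 1 < (z.length : Int) ∧ PySem.List.pyGetD z ((j : Int) + 1) 0 = 1)) := by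
  constructor
  · rintro ⟨x, hx, hz1, hcase⟩
    rw [PySem.List.mem_pyRange_one] at hx
    rcases hcase with ⟨hx1, hj1⟩ | ⟨hx2, hj2⟩
    · refine Or.inr ⟨by omega, ?_⟩
      have hxe : (j : Int) + 1 = x := by omega
      rw [hxe]; exact hz1
    · refine Or.inl ⟨by omega, ?_⟩
      have hxe : (j : Int) - 1 = x := by omega
      rw [hxe]; exact hz1
  · rintro (⟨h1, h2⟩ | ⟨h1, h2⟩)
    · exact ⟨(j : Int) - 1, by rw [PySem.List.mem_pyRange_one]; omega, h2,
        Or.inr ⟨by omega, by omega⟩⟩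
    · exact ⟨(j : Int) + 1, by rw [PySem.List.mem_pyRange_one]; omega, h2,
        Or.inl ⟨by omega, by omega⟩⟩

theorem spread_eq (b : List Int) (i n : Int)
    (hb : (b.length : Int) = n) (h0 : 0 ≤ i) (hi : i < n) :
    spreadCancer (PySem.List.pySetD b i 0) = nextBoard b i n := by
  have hbl : 0 ≤ (b.length : Int) := Int.natCast_nonneg _
  have hzl : (PySem.List.pySetD b i 0).length = b.length :=
    PySem.List.length_pySetD b i 0
  unfold nextBoard
  rw [zeroed_eq b i h0 (by omega)]
  apply List.ext_getElem?
  intro j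
  rw [spreadCancer_eq_foldl,
    spread_get (PySem.List.pySetD b i 0) _ _ (by simp)
      (fun x hx => by rw [PySem.List.mem_pyRange_one] at hx; omega) j]
  by_cases hjl : j < b.length
  · have hjn : j < n.toNat := by omega
    have hn' : n = ((n.toNat : Nat) : Int) := by omega
    rw [hn', PySem.List.getElem?_map_pyRange_zero _ n.toNat j hjn]
    have hiff := exists_writer_iff (PySem.List.pySetD b i 0) j (by omega)
    by_cases hc : ∃ x ∈ PySem.List.pyRange 0 ((PySem.List.pySetD b i 0).length : Int) 1,
        PySem.List.pyGetD (PySem.List.pySetD b i 0) x 0 = 1 ∧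
          ((1 ≤ x ∧ (j : Int) = x - 1) ∨
           (x + 1 < ((PySem.List.pySetD b i 0).length : Int) ∧ (j : Int) = x + 1))
    · rw [if_pos hc, if_pos ?_]
      rcases hiff.mp hc with ⟨h1, h2⟩ | ⟨h1, h2⟩
      · exact Or.inl ⟨h1, by simpa using h2⟩
      · exact Or.inr ⟨by omega, by simpa using h2⟩
    · rw [if_neg hc, List.getElem?_replicate, if_pos (by omega), if_neg ?_]
      intro hr
      apply hc
      apply hiff.mpr
      rcases hr with ⟨h1, h2⟩ | ⟨h1, h2⟩
      · exact Or.inl ⟨h1, by simpa using h2⟩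
      · exact Or.inr ⟨by omega, by simpa using h2⟩
  · have h1 : ¬ (j < (PySem.List.pySetD b i 0).length) := by omega
    have hmapl : (List.map (fun j =>
        if (0 < j ∧ PySem.List.pyGetD (PySem.List.pySetD b i 0) (j - 1) 0 == 1) ∨
           (j + 1 < n ∧ PySem.List.pyGetD (PySem.List.pySetD b i 0) (j + 1) 0 == 1)
          then (1 : Int) else 0) (PySem.List.pyRange 0 n 1)).length = n.toNat := by
      simp [PySem.List.length_pyRange_one]
    rw [List.getElem?_eq_none (by rw [List.length_replicate]; omega),
      List.getElem?_eq_none (le_of_eq_of_le hmapl (by omega))]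
    rw [if_neg ?_]
    rintro ⟨x, hx, _, hcase⟩
    rw [PySem.List.mem_pyRange_one] at hx
    omega

theorem length_nextBoard (b : List Int) (i n : Int) (hn : 0 ≤ n) :
    ((nextBoard b i n).length : Int) = n := by
  unfold nextBoard
  simp [PySem.List.length_pyRange_one]
  omega

theorem dfsLoop_eq (n : Int) (r : Nat) (depth maxDepth : Int) (moves : List Int)
    (hd : depth + ((r : Int) + 1) = maxDepth)
    (hdfs : ∀ (b' : List Int) (mv : List Int), (b'.length : Int) = n →
      dfs b' (depth + 1) maxDepth mv = (g n b' r).map (mv ++ ·)) :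
    ∀ (l : List Int) (b : List Int), (b.length : Int) = n →
      (∀ i ∈ l, 0 ≤ i ∧ i < n) →
      dfsLoop b depth maxDepth moves l =
        (gLoop (fun nb => g n nb r) b n l).map (moves ++ ·) := by
  intro l
  induction l with
  | nil => intro b hb hpos; rw [dfsLoop, gLoop]; rfl
  | cons i rest ih =>
    intro b hb hpos
    rw [dfsLoop, gLoop]
    by_cases hc : (PySem.List.pyGetD b i 0 == 1) = true
    · rw [if_pos hc, if_pos hc, dif_pos (show depth < maxDepth by omega)]
      have hbound := hpos i (List.mem_cons_self ..)
      rw [spread_eq b i n hb hbound.1 hbound.2,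
        hdfs (nextBoard b i n) (moves ++ [i + 1])
          (length_nextBoard b i n (by omega))]
      cases g n (nextBoard b i n) r with
      | some sfx => simp
      | none =>
        simp only [Option.map_none]
        exact ih b hb (fun x hx => hpos x (List.mem_cons_of_mem _ hx))
    · rw [if_neg hc, if_neg hc]
      exact ih b hb (fun x hx => hpos x (List.mem_cons_of_mem _ hx))

theorem dfs_eq (n : Int) :
    ∀ (r : Nat) (b : List Int) (depth maxDepth : Int) (moves : List Int),
      (b.length : Int) = n → depth + (r : Int) = maxDepth →
      dfs b depth maxDepth moves = (g n b r).map (moves ++ ·) := by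
  intro r
  induction r with
  | zero =>
    intro b depth maxDepth moves hb hd
    rw [dfs, if_pos (by simp; omega)]
    cases hall : b.all (fun x => x == 0) <;> simp [g, hall]
  | succ r ih =>
    intro b depth maxDepth moves hb hd
    rw [dfs, if_neg (by simp; omega), hb]
    have hg : g n b (r + 1) = gLoop (fun nb => g n nb r) b n (PySem.List.pyRange 0 n 1) := rfl
    rw [hg]
    exact dfsLoop_eq n r depth maxDepth moves (by push_cast at hd ⊢; omega)
      (fun b' mv hb' => ih b' (depth + 1) maxDepth mv hb' (by push_cast at hd ⊢; omega))
      (PySem.List.pyRange 0 n 1) b hb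
      (fun x hx => by rw [PySem.List.mem_pyRange_one] at hx; omega)

theorem ids_loops_eq (board : List Int) :
    ∀ (k : Nat) (d : Int) (memo : Memo), 0 ≤ d →
      ((board.length : Int) + 1 - d).toNat = k → GoodM (board.length : Int) memo →
      idsLoop board d (board.length : Int) =
        idsAltLoop (board.length : Int) board memo
          (PySem.List.pyRange d ((board.length : Int) + 1) 1) := by
  intro k
  induction k with
  | zero =>
    intro d memo hd hk hm
    rw [idsLoop, if_neg (by omega), PySem.List.pyRange_one_eq_nil (by omega), idsAltLoop]
  | succ k ihk =>
    intro d memo hd hk hm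
    have hdn : d ≤ (board.length : Int) := by omega
    rw [idsLoop, if_pos hdn, PySem.List.pyRange_one_cons (by omega), idsAltLoop]
    cases hs : solveN (board.length : Int) board d.toNat memo with
    | mk fst memo' =>
      have hok := solveN_ok (board.length : Int) d.toNat board memo hm
      rw [hs] at hok
      obtain ⟨hfst, hgood⟩ := hok
      rw [dfs_eq (board.length : Int) d.toNat board 0 d [] rfl (by omega)]
      cases fst with
      | some res =>
        rw [show g (board.length : Int) board d.toNat = some res from hfst.symm]
        simp
      | none =>
        rw [show g (board.length : Int) board d.toNat = none from hfst.symm]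
        exact ihk (d + 1) memo' (by omega) (by omega) hgood

-- ===== VERDICT (by name: the statement is the Claim_ definition above) =====
theorem ids_spec : Claim_equal_ids := by
  intro board _
  unfold Spec_ids ids ids_alt
  simp only [PySem.List.len_eq]
  exact ids_loops_eq board ((board.length : Int) + 1 - 0).toNat 0 PySem.Dict.empty
    (by omega) rfl (goodM_empty _)
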